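-- pv_equiv track=rewrite | github.com/robinduval/LeSerpent | groupe22/snake-algo.py | _build_hamiltonian_serpentine
-- ===== SOURCE A (Python) =====
-- def _build_hamiltonian_serpentine(n: int):
--     path = []
--     for y in range(n):
--         row = [(x, y) for x in range(n)]
--         if y % 2 == 1:
--             row.reverse()
--         path.extend(row)
--     return path
-- ===== SOURCE B (Python) =====
-- def _build_hamiltonian_serpentine(n: int):
--     if n <= 0:
--         return []
--     path = []
--     for i in range(n * n):
--         y = i // n
--         c = i % n
--         path.append((c if y % 2 == 0 else n - 1 - c, y))
--     return path
-- ===== Notes on version B (the rewrite author's own statement) =====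
-- stated objective: alternative
-- what changed: Replaces the per-row build-then-reverse loop with a single loop over range(n*n) that computes each coordinate directly by divmod and a parity formula (x = c on even rows, n-1-c on odd rows), never materialising or reversing a row.
import Mathlib
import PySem

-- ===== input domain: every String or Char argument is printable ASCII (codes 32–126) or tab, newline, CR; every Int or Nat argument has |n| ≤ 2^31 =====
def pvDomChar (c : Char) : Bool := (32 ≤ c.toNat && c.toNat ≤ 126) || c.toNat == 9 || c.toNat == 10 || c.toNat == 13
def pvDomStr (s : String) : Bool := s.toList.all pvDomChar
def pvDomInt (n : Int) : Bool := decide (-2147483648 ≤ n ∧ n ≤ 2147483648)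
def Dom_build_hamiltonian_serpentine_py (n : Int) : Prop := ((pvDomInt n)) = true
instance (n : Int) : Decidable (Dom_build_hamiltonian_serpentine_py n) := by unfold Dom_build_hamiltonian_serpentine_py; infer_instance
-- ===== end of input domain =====

-- B replaces A's row-building-and-reversing loop with a single index loop over range(n*n),
-- computing each coordinate by divmod and a parity formula (objective: alternative decomposition).

-- ===== PORT A =====
def build_hamiltonian_serpentine_py (n : Int) : List (Int × Int) :=
  (PySem.List.pyRange 0 n 1).foldl (fun path y =>
    let row := (PySem.List.pyRange 0 n 1).map (fun x => (x, y))
    let row := if PySem.Int.mod y 2 = 1 then row.reverse else row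
    path ++ row) []

-- ===== PORT B =====
def build_hamiltonian_serpentine_py_alt (n : Int) : List (Int × Int) :=
  if n ≤ 0 then []
  else
    (PySem.List.pyRange 0 (n * n) 1).foldl (fun path i =>
      let y := PySem.Int.floordiv i n
      let c := PySem.Int.mod i n
      path ++ [(if PySem.Int.mod y 2 = 0 then c else n - 1 - c, y)]) []

-- ===== PRECONDITION & SPEC =====
def Spec_build_hamiltonian_serpentine_py (n : Int) (out : List (Int × Int)) : Prop := out = build_hamiltonian_serpentine_py_alt n
instance (n : Int) (out : List (Int × Int)) : Decidable (Spec_build_hamiltonian_serpentine_py n out) := by unfold Spec_build_hamiltonian_serpentine_py; infer_instance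

-- ===== CLAIM (what is proved, stated in full; the proofs are below) =====
def Claim_equal_build_hamiltonian_serpentine_py : Prop := ∀ (n : Int), Dom_build_hamiltonian_serpentine_py n → Spec_build_hamiltonian_serpentine_py n (build_hamiltonian_serpentine_py n)

-- ===== LEMMAS AND PROOFS =====

-- range (a*n) grouped into a blocks of n consecutive indices
theorem pv_range_mul (a n : Nat) :
    List.range (a * n) = (List.range a).flatMap (fun y => (List.range n).map (fun c => y * n + c)) := by
  induction a with
  | zero => simp
  | succ a ih =>
    rw [Nat.succ_mul, List.range_add, ih, List.range_succ, List.flatMap_append]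
    simp

-- reverse of range n enumerated forwards
theorem pv_reverse_range (n : Nat) :
    (List.range n).reverse = (List.range n).map (fun c => n - 1 - c) := by
  apply List.ext_getElem
  · simp
  · intro k h1 h2
    simp

theorem pv_flatMap_congr {α β : Type} {l : List α} {f g : α → List β}
    (h : ∀ x ∈ l, f x = g x) : l.flatMap f = l.flatMap g := by
  induction l with
  | nil => rfl
  | cons a t ih =>
    simp only [List.flatMap_cons, h a (List.mem_cons_self), ih (fun x hx => h x (List.mem_cons_of_mem a hx))]

-- A as a flatMap of rows
theorem pv_A_eq (n : Int) :
    build_hamiltonian_serpentine_py n =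
      (PySem.List.pyRange 0 n 1).flatMap (fun y =>
        if PySem.Int.mod y 2 = 1 then ((PySem.List.pyRange 0 n 1).map (fun x => (x, y))).reverse
        else (PySem.List.pyRange 0 n 1).map (fun x => (x, y))) := by
  unfold build_hamiltonian_serpentine_py
  rw [PySem.List.foldl_append_eq_flatMap]
  simp only [List.nil_append]

-- B as a map over the index range
theorem pv_B_eq (n : Int) (h : ¬ n ≤ 0) :
    build_hamiltonian_serpentine_py_alt n =
      (PySem.List.pyRange 0 (n * n) 1).map (fun i =>
        (if PySem.Int.mod (PySem.Int.floordiv i n) 2 = 0 then PySem.Int.mod i n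
         else n - 1 - PySem.Int.mod i n, PySem.Int.floordiv i n)) := by
  unfold build_hamiltonian_serpentine_py_alt
  rw [if_neg h, PySem.List.foldl_append_singleton_eq_map]
  simp

-- ===== VERDICT (by name: the statement is the Claim_ definition above) =====
theorem build_hamiltonian_serpentine_py_spec : Claim_equal_build_hamiltonian_serpentine_py := by
  intro n _
  unfold Spec_build_hamiltonian_serpentine_py
  by_cases h : n ≤ 0
  · rw [pv_A_eq, PySem.List.pyRange_one_eq_nil (by omega)]
    unfold build_hamiltonian_serpentine_py_alt
    rw [if_pos h]
    rfl
  · -- positive case: set m = n.toNat and compare block by block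
    rw [pv_A_eq, pv_B_eq n h]
    obtain ⟨m, rfl⟩ : ∃ m : Nat, n = (m : Int) := ⟨n.toNat, by omega⟩
    have hm : 0 < m := by omega
    have hcast : ((m : Int) * (m : Int)) = ((m * m : Nat) : Int) := by push_cast; ring
    rw [hcast, PySem.List.pyRange_one, PySem.List.pyRange_one]
    simp only [Int.sub_zero, Int.toNat_natCast, zero_add]
    rw [pv_range_mul m m]
    simp only [List.flatMap_map, List.map_flatMap]
    apply pv_flatMap_congr
    intro y hy
    simp only [List.mem_range] at hy
    simp only [List.map_map]
    have hym : PySem.Int.mod (y : Int) 2 = ((y % 2 : Nat) : Int) := by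
      rw [PySem.Int.mod_eq_emod_of_pos (by norm_num)]; push_cast; rfl
    have hB : List.map ((fun i => (if PySem.Int.mod (PySem.Int.floordiv i (m : Int)) 2 = 0
            then PySem.Int.mod i (m : Int) else (m : Int) - 1 - PySem.Int.mod i (m : Int),
            PySem.Int.floordiv i (m : Int))) ∘ (fun k : Nat => (k : Int)) ∘ fun c => y * m + c)
          (List.range m)
        = List.map (fun c : Nat =>
            ((if y % 2 = 0 then (c : Int) else (m : Int) - 1 - (c : Int)), (y : Int)))
          (List.range m) := by
      apply List.map_congr_left
      intro c hc
      simp only [List.mem_range] at hc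
      have hcast2 : ((y * m + c : Nat) : Int) = ((m * y + c : Nat) : Int) := by push_cast; ring
      have h1 : PySem.Int.floordiv ((y * m + c : Nat) : Int) (m : Int) = (y : Int) := by
        rw [hcast2, PySem.Int.floordiv_natCast, Nat.mul_add_div hm, Nat.div_eq_of_lt hc]
        simp
      have h2 : PySem.Int.mod ((y * m + c : Nat) : Int) (m : Int) = (c : Int) := by
        rw [hcast2, PySem.Int.mod_natCast, Nat.mul_add_mod, Nat.mod_eq_of_lt hc]
      simp only [Function.comp_apply]
      rw [h1, h2, hym]
      by_cases h0 : y % 2 = 0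
      · simp [h0]
      · have h1' : y % 2 = 1 := by omega
        simp [h1']
    rw [hB]
    by_cases h0 : y % 2 = 0
    · rw [hym, h0, if_neg (by norm_num)]
      apply List.map_congr_left
      intro c _
      simp
    · have h1' : y % 2 = 1 := by omega
      rw [hym, h1', if_pos (by norm_num)]
      rw [← List.map_reverse, pv_reverse_range, List.map_map]
      apply List.map_congr_left
      intro c hc
      simp only [List.mem_range] at hc
      have hmc : ((m - 1 - c : Nat) : Int) = (m : Int) - 1 - (c : Int) := by omega
      simp [hmc]
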